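-- pv_equiv track=rewrite | github.com/chankoo/problem-solving | dp/boj15990.py | case_cnt
-- ===== SOURCE A (Python) =====
-- from collections import deque
--
-- def case_cnt(n):
--     mem = deque([])
--     # 기저 case 설정
--     mem.append([1,0,0]) # n==1 case (1)
--     mem.append([0,1,0]) # n==2 case (2)
--     mem.append([1,1,1]) # n==3 case (1+2, 2+1, 3)
--
--     if n < 4: # 4미만일 경우 기저 case를 리턴
--         return sum(mem[n-1])
--
--     cache = mem # mem을 모두 저장하지말고 cache로 관리
--     for _ in range(3,n): # from 4 to N까지
--         this_val = deque([])
--         this_val.append(cache[-1][1] + cache[-1][2]) # 1로 시작해 정수 row를 만드는 경우의 수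
--         this_val.append(cache[-2][0] + cache[-2][2]) # 2로 시작해 정수 row를 만드는 경우의 수
--         this_val.append(cache[-3][0] + cache[-3][1]) # 3로 시작해 정수 row를 만드는 경우의 수
--
--         cache.append(this_val) # cache의 마지막 요소로 추가
--         cache.popleft() # 기억할 필요없어진 cache의 첫번째 요소 삭제
--     return sum(cache[-1]) % 1000000009
-- ===== SOURCE B (Python) =====
-- MOD = 1000000009
--
-- def _mat_mul(A, B):
--     return [[sum(A[i][k] * B[k][j] for k in range(9)) % MOD for j in range(9)]
--             for i in range(9)]
--
-- def _mat_vec(A, v):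
--     return [sum(A[i][k] * v[k] for k in range(9)) % MOD for i in range(9)]
--
-- def _mat_pow(A, e):
--     R = [[1 if i == j else 0 for j in range(9)] for i in range(9)]
--     while e:
--         if e & 1:
--             R = _mat_mul(R, A)
--         A = _mat_mul(A, A)
--         e >>= 1
--     return R
--
-- # transition on the 9-state (row i, row i-1, row i-2), each row a dp triple
-- _T = [[0, 1, 1, 0, 0, 0, 0, 0, 0],
--       [0, 0, 0, 1, 0, 1, 0, 0, 0],
--       [0, 0, 0, 0, 0, 0, 1, 1, 0],
--       [1, 0, 0, 0, 0, 0, 0, 0, 0],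
--       [0, 1, 0, 0, 0, 0, 0, 0, 0],
--       [0, 0, 1, 0, 0, 0, 0, 0, 0],
--       [0, 0, 0, 1, 0, 0, 0, 0, 0],
--       [0, 0, 0, 0, 1, 0, 0, 0, 0],
--       [0, 0, 0, 0, 0, 1, 0, 0, 0]]
--
-- def case_cnt(n):
--     base = [[1, 0, 0], [0, 1, 0], [1, 1, 1]]
--     if n < 4:
--         return sum(base[n - 1])
--     P = _mat_pow(_T, n - 3)
--     w = _mat_vec(P, [1, 1, 1, 0, 1, 0, 1, 0, 0])
--     return (w[0] + w[1] + w[2]) % MOD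
-- ===== Notes on version B (the rewrite author's own statement) =====
-- stated objective: faster
-- what changed: Replaces the linear sliding-window DP over exact big integers with O(log n) binary exponentiation of the fixed 9x9 transition matrix modulo 1000000009 applied to the initial 9-state of dp rows 1..3.
import Mathlib
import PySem

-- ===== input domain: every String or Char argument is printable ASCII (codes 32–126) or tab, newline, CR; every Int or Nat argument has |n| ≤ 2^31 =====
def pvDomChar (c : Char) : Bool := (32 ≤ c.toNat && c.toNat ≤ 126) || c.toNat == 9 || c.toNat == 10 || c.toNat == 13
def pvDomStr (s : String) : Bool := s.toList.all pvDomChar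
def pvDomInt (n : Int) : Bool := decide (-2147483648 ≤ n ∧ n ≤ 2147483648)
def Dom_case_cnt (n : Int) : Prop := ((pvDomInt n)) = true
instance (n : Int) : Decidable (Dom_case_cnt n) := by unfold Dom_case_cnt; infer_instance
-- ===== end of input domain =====

-- B replaces A's linear sliding-window DP (exact integers, mod at the end) by binary
-- exponentiation of the fixed 9x9 transition matrix mod 1000000009 (objective: faster).

-- ===== PORT A =====
-- cache[-k] / row[j]: pyGet? with default (Pre_ keeps every index in range)
def aRow (c : List (List Int)) (i : Int) : List Int := (PySem.List.pyGet? c i).getD []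
def aAt (r : List Int) (j : Int) : Int := (PySem.List.pyGet? r j).getD 0

def aStep (cache : List (List Int)) : List (List Int) :=
  let this_val : List Int :=
    [aAt (aRow cache (-1)) 1 + aAt (aRow cache (-1)) 2,
     aAt (aRow cache (-2)) 0 + aAt (aRow cache (-2)) 2,
     aAt (aRow cache (-3)) 0 + aAt (aRow cache (-3)) 1]
  (cache ++ [this_val]).drop 1    -- append then popleft

def case_cnt (n : Int) : Int :=
  let mem : List (List Int) := [[1,0,0],[0,1,0],[1,1,1]]
  if n < 4 then
    ((PySem.List.pyGet? mem (n-1)).getD []).sum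
  else
    let cache := (PySem.List.pyRange 3 n 1).foldl (fun c _ => aStep c) mem
    ((PySem.List.pyGet? cache (-1)).getD []).sum % 1000000009

-- ===== PORT B =====
def bMOD : Int := 1000000009
def bGet (v : List Int) (i : Nat) : Int := v.getD i 0
def bGet2 (A : List (List Int)) (i k : Nat) : Int := (A.getD i []).getD k 0

def bMatMul (A B : List (List Int)) : List (List Int) :=
  (List.range 9).map (fun i => (List.range 9).map (fun j =>
    ((List.range 9).foldl (fun s k => s + bGet2 A i k * bGet2 B k j) 0) % bMOD))

def bMatVec (A : List (List Int)) (v : List Int) : List Int :=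
  (List.range 9).map (fun i =>
    ((List.range 9).foldl (fun s k => s + bGet2 A i k * bGet v k) 0) % bMOD)

def bId : List (List Int) :=
  (List.range 9).map (fun i => (List.range 9).map (fun j => if i = j then (1 : Int) else 0))

-- while e: (if e&1: R = R*A); A = A*A; e >>= 1  — e is the nonnegative int n-3
def bMatPowAux (R A : List (List Int)) (e : Nat) : List (List Int) :=
  if h : e = 0 then R
  else bMatPowAux (if e % 2 = 1 then bMatMul R A else R) (bMatMul A A) (e / 2)
termination_by e
decreasing_by exact Nat.div_lt_self (Nat.pos_of_ne_zero h) (by norm_num)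

def bT : List (List Int) :=
  [[0,1,1,0,0,0,0,0,0],
   [0,0,0,1,0,1,0,0,0],
   [0,0,0,0,0,0,1,1,0],
   [1,0,0,0,0,0,0,0,0],
   [0,1,0,0,0,0,0,0,0],
   [0,0,1,0,0,0,0,0,0],
   [0,0,0,1,0,0,0,0,0],
   [0,0,0,0,1,0,0,0,0],
   [0,0,0,0,0,1,0,0,0]]

def case_cnt_alt (n : Int) : Int :=
  let base : List (List Int) := [[1,0,0],[0,1,0],[1,1,1]]
  if n < 4 then
    ((PySem.List.pyGet? base (n-1)).getD []).sum
  else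
    let P := bMatPowAux bId bT (n-3).toNat   -- n ≥ 4 here, so toNat is exact
    let w := bMatVec P [1,1,1,0,1,0,1,0,0]
    (bGet w 0 + bGet w 1 + bGet w 2) % bMOD

-- ===== PRECONDITION & SPEC =====
-- A raises IndexError (mem[n-1] out of range) exactly when n ≤ -3; B raises there too.
def Pre_case_cnt (n : Int) : Prop := -2 ≤ n
instance (n : Int) : Decidable (Pre_case_cnt n) := by unfold Pre_case_cnt; infer_instance
def pvWitness_case_cnt : Int := 5

def Spec_case_cnt (n : Int) (out : Int) : Prop := out = case_cnt_alt n
instance (n : Int) (out : Int) : Decidable (Spec_case_cnt n out) := by unfold Spec_case_cnt; infer_instance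

-- ===== CLAIM (what is proved, stated in full; the proofs are below) =====
def Claim_equal_case_cnt : Prop := ∀ (n : Int), Dom_case_cnt n → Pre_case_cnt n → Spec_case_cnt n (case_cnt n)

-- ===== LEMMAS AND PROOFS =====

-- exact dp rows: Rw k = dp row (k+1)
def Rw : Nat → Int × Int × Int
  | 0 => (1,0,0)
  | 1 => (0,1,0)
  | 2 => (1,1,1)
  | (k+3) => ((Rw (k+2)).2.1 + (Rw (k+2)).2.2,
              (Rw (k+1)).1  + (Rw (k+1)).2.2,
              (Rw k).1      + (Rw k).2.1)

def tl (t : Int × Int × Int) : List Int := [t.1, t.2.1, t.2.2]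

abbrev K := ZMod 1000000009

def toMat (L : List (List Int)) : Matrix (Fin 9) (Fin 9) K :=
  fun i j => ((bGet2 L i j : Int) : K)

def toVec (v : List Int) : Fin 9 → K := fun i => ((bGet v i : Int) : K)

def vecR (e : Nat) : Fin 9 → K :=
  ![((Rw (e+2)).1 : K), ((Rw (e+2)).2.1 : K), ((Rw (e+2)).2.2 : K),
    ((Rw (e+1)).1 : K), ((Rw (e+1)).2.1 : K), ((Rw (e+1)).2.2 : K),
    ((Rw e).1 : K), ((Rw e).2.1 : K), ((Rw e).2.2 : K)]

lemma castK_mod (a : Int) : ((a % bMOD : Int) : K) = (a : K) := by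
  have h : ((1000000009 : ℕ) : ℤ) = bMOD := by norm_num [bMOD]
  rw [← h, ZMod.intCast_mod]

lemma getD_map_range9 {α : Type} (f : Nat → α) (d : α) (i : Nat) (h : i < 9) :
    ((List.range 9).map f).getD i d = f i := by
  rw [List.getD_eq_getElem?_getD]
  simp [h]

lemma foldl_range9_sum (f : Nat → Int) :
    (List.range 9).foldl (fun s k => s + f k) 0 = ∑ k ∈ Finset.range 9, f k := by
  simp [List.range_succ, Finset.sum_range_succ]

lemma bGet2_matMul (A B : List (List Int)) (i j : Fin 9) :
    bGet2 (bMatMul A B) i j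
      = ((List.range 9).foldl (fun s k => s + bGet2 A i k * bGet2 B k j) 0) % bMOD := by
  unfold bMatMul bGet2
  rw [getD_map_range9 _ _ _ i.isLt, getD_map_range9 _ _ _ j.isLt]

lemma toMat_mul (A B : List (List Int)) : toMat (bMatMul A B) = toMat A * toMat B := by
  funext i j
  rw [Matrix.mul_apply]
  show ((bGet2 (bMatMul A B) i j : Int) : K) = _
  rw [bGet2_matMul, castK_mod, foldl_range9_sum]
  rw [← Fin.sum_univ_eq_sum_range (fun k => bGet2 A i k * bGet2 B k j) 9]
  push_cast
  rfl

lemma toVec_matVec (A : List (List Int)) (v : List Int) :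
    toVec (bMatVec A v) = (toMat A).mulVec (toVec v) := by
  funext i
  unfold toVec bMatVec bGet
  rw [getD_map_range9 _ _ _ i.isLt, castK_mod, foldl_range9_sum]
  rw [← Fin.sum_univ_eq_sum_range (fun k => bGet2 A i k * (v.getD k 0)) 9]
  rw [Matrix.mulVec]
  push_cast
  rfl

lemma toMat_id : toMat bId = 1 := by
  funext i j
  fin_cases i <;> fin_cases j <;>
    simp [toMat, bId, bGet2, List.range_succ]

lemma toMat_powAux (e : Nat) : ∀ (R A : List (List Int)),
    toMat (bMatPowAux R A e) = toMat R * toMat A ^ e := by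
  induction e using Nat.strong_induction_on with
  | _ e ih =>
    intro R A
    rw [bMatPowAux]
    by_cases h : e = 0
    · simp [h]
    · have hlt : e / 2 < e := Nat.div_lt_self (Nat.pos_of_ne_zero h) (by norm_num)
      rw [dif_neg h, ih _ hlt, toMat_mul]
      by_cases hp : e % 2 = 1
      · simp only [hp, if_true, toMat_mul]
        have : e = 2 * (e / 2) + 1 := by omega
        rw [mul_assoc]
        congr 1
        rw [← pow_two, ← pow_mul]
        rw [← pow_succ']
        congr 1
        omega
      · simp only [hp, if_false]
        congr 1
        rw [← pow_two, ← pow_mul]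
        congr 1
        omega

lemma vecR_step (e : Nat) : (toMat bT).mulVec (vecR e) = vecR (e+1) := by
  funext i
  rw [Matrix.mulVec]
  fin_cases i <;>
    · simp only [dotProduct, Fin.sum_univ_succ, Finset.univ_unique,
        Fin.default_eq_zero, Finset.sum_singleton]
      norm_num [toMat, bGet2, bT, vecR, Rw]
      try push_cast
      try ring

lemma vecR_pow (e : Nat) : ((toMat bT) ^ e).mulVec (vecR 0) = vecR e := by
  induction e with
  | zero => simp [Matrix.one_mulVec]
  | succ k ih =>
    rw [pow_succ', ← Matrix.mulVec_mulVec, ih, vecR_step]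

-- A-side: the loop body on an explicit 3-row cache
lemma aStep_triple (a b c : Int × Int × Int) :
    aStep [tl a, tl b, tl c]
      = [tl b, tl c, [c.2.1 + c.2.2, b.1 + b.2.2, a.1 + a.2.1]] := by
  simp [aStep, aRow, aAt, tl, PySem.List.pyGet?, PySem.List.pyIdx?]

lemma foldl_const_iterate {α β : Type} (f : α → α) (l : List β) (x : α) :
    l.foldl (fun c _ => f c) x = f^[l.length] x := by
  induction l generalizing x with
  | nil => rfl
  | cons h t ih => simp [List.foldl_cons, ih, Function.iterate_succ_apply]

lemma aStep_iterate (e : Nat) :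
    aStep^[e] [tl (Rw 0), tl (Rw 1), tl (Rw 2)]
      = [tl (Rw e), tl (Rw (e+1)), tl (Rw (e+2))] := by
  induction e with
  | zero => rfl
  | succ k ih =>
    rw [Function.iterate_succ_apply', ih, aStep_triple]
    simp [tl, Rw]

lemma mod_eq_of_castK {a b : Int} (h : (a : K) = (b : K)) :
    a % 1000000009 = b % 1000000009 := by
  have := (ZMod.intCast_eq_intCast_iff a b 1000000009).mp h
  have h2 : ((1000000009 : ℕ) : ℤ) = (1000000009 : ℤ) := by norm_num
  simpa [Int.ModEq, h2] using this

lemma case_cnt_big (n : Int) (hn : 4 ≤ n) : case_cnt n = case_cnt_alt n := by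
  have hlt : ¬ n < 4 := by omega
  set e : Nat := (n - 3).toNat with he
  -- A side
  have hlen : (PySem.List.pyRange 3 n 1).length = e := by
    rw [PySem.List.length_pyRange_one]
  have hA : case_cnt n = (tl (Rw (e+2))).sum % 1000000009 := by
    unfold case_cnt
    simp only [hlt, if_false]
    rw [foldl_const_iterate, hlen]
    have hinit : ([[1,0,0],[0,1,0],[1,1,1]] : List (List Int))
        = [tl (Rw 0), tl (Rw 1), tl (Rw 2)] := by simp [tl, Rw]
    rw [hinit, aStep_iterate]
    simp [PySem.List.pyGet?, PySem.List.pyIdx?]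
  -- B side
  have hB : case_cnt_alt n
      = (bGet (bMatVec (bMatPowAux bId bT e) [1,1,1,0,1,0,1,0,0]) 0
         + bGet (bMatVec (bMatPowAux bId bT e) [1,1,1,0,1,0,1,0,0]) 1
         + bGet (bMatVec (bMatPowAux bId bT e) [1,1,1,0,1,0,1,0,0]) 2) % bMOD := by
    unfold case_cnt_alt
    simp only [hlt, if_false]
    rw [← he]
  have hv0 : toVec [1,1,1,0,1,0,1,0,0] = vecR 0 := by
    funext i
    fin_cases i <;> simp [toVec, bGet, vecR, Rw]
  have hvec : toVec (bMatVec (bMatPowAux bId bT e) [1,1,1,0,1,0,1,0,0]) = vecR e := by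
    rw [toVec_matVec, toMat_powAux, toMat_id, one_mul, hv0, vecR_pow]
  rw [hA, hB]
  apply mod_eq_of_castK
  have h0 : ((bGet (bMatVec (bMatPowAux bId bT e) [1,1,1,0,1,0,1,0,0]) 0 : Int) : K)
      = ((Rw (e+2)).1 : K) := by simpa [toVec, vecR] using congrFun hvec 0
  have h1 : ((bGet (bMatVec (bMatPowAux bId bT e) [1,1,1,0,1,0,1,0,0]) 1 : Int) : K)
      = ((Rw (e+2)).2.1 : K) := by simpa [toVec, vecR] using congrFun hvec 1
  have h2 : ((bGet (bMatVec (bMatPowAux bId bT e) [1,1,1,0,1,0,1,0,0]) 2 : Int) : K)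
      = ((Rw (e+2)).2.2 : K) := by simpa [toVec, vecR] using congrFun hvec 2
  simp [tl, List.sum]
  rw [h0, h1, h2]
  ring

-- ===== VERDICT (by name: the statement is the Claim_ definition above) =====
theorem case_cnt_spec : Claim_equal_case_cnt := by
  intro n _ hpre
  unfold Spec_case_cnt
  by_cases h : n < 4
  · have h2 : -2 ≤ n := hpre
    interval_cases n <;> decide
  · exact case_cnt_big n (by omega)
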